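-- pv_equiv track=rewrite | github.com/christopherbdaugherty96/NovaLIS | nova_backend/src/memory/user_memory_store.py | _search_tokens
-- ===== SOURCE A (Python) =====
-- def _search_tokens(query: str) -> list[str]:
--     raw = str(query or "").strip().lower()
--     stopwords = {"a", "an", "and", "for", "from", "i", "in", "is", "it", "my", "of", "the", "to", "what", "with"}
--     tokens: list[str] = []
--     for word in raw.split():
--         cleaned = "".join(ch for ch in word if ch.isalnum() or ch in {"-", "_"})
--         if len(cleaned) >= 2 and cleaned not in stopwords and cleaned not in tokens:
--             tokens.append(cleaned)
--     return tokens
-- ===== SOURCE B (Python) =====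
-- def _emit(word, stopwords, seen, out):
--     if len(word) >= 2 and word not in stopwords and word not in seen:
--         seen.add(word)
--         out.append(word)
--
--
-- def _search_tokens(query: str) -> list[str]:
--     raw = str(query or "").strip().lower()
--     stopwords = {"a", "an", "and", "for", "from", "i", "in", "is", "it", "my", "of", "the", "to", "what", "with"}
--     seen: set = set()
--     out: list[str] = []
--     buf: list[str] = []
--     # single character-level scan: no split(), no per-word cleaning pass
--     for ch in raw:
--         if ch.isspace():
--             _emit("".join(buf), stopwords, seen, out)
--             buf = []
--         elif ch.isalnum() or ch in "-_":
--             buf.append(ch)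
--         # any other character is punctuation inside a word: dropped, no boundary
--     _emit("".join(buf), stopwords, seen, out)
--     return out
-- ===== Notes on version B (the rewrite author's own statement) =====
-- stated objective: alternative
-- what changed: B is a single character-level state-machine scan that builds tokens directly (buffer flushed at whitespace, punctuation dropped in stream, seen-set dedup), eliminating A's split() pass and its nested per-word join/filter pass and its linear membership scan of the token list.
import Mathlib
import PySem

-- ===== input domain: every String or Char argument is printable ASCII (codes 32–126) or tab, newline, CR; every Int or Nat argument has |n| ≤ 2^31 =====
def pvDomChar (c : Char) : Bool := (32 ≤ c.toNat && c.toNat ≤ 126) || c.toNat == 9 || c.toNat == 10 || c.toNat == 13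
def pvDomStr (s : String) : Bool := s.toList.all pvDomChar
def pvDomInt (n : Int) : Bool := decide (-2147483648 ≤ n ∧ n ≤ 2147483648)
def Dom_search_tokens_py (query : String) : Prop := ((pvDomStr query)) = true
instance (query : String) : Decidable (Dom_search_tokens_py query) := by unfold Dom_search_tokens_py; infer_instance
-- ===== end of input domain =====

-- B replaces A's split()-then-clean-each-word pipeline by a single character-level scan that
-- builds tokens directly (buffer flushed at whitespace, punctuation dropped in the stream,
-- seen-set dedup); objective: alternative single-pass decomposition.

-- the stopword set literal, shared by both Python versions verbatim
def pvStopwords : List (List Char) :=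
  (["a", "an", "and", "for", "from", "i", "in", "is", "it", "my", "of", "the", "to", "what", "with"]).map String.toList

-- the word-character test both Pythons write: ch.isalnum() or ch in "-_"
def pvK (c : Char) : Bool := PySem.Chars.isalnum c || c == '-' || c == '_'

-- ===== PORT A =====
-- 'str(query or "")' is the identity on str inputs (query if nonempty, "" otherwise = query)
def search_tokens_py (query : String) : List String :=
  let raw := PySem.Chars.lower (PySem.Chars.strip query.toList)
  let stopwords : PySem.Set (List Char) := PySem.Set.ofList pvStopwords
  let tokens := (PySem.Chars.split₀ raw).foldl
    (fun tokens word =>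
      let cleaned := word.filter pvK
      if 2 ≤ cleaned.length && !stopwords.contains cleaned && !tokens.contains cleaned
      then tokens ++ [cleaned] else tokens) []
  tokens.map String.ofList

-- ===== PORT B =====
-- Python helper _emit(word, stopwords, seen, out): mutates (seen, out); here state-passing
def pvEmit (stopwords : PySem.Set (List Char)) (word : List Char)
    (st : PySem.Set (List Char) × List (List Char)) :
    PySem.Set (List Char) × List (List Char) :=
  if 2 ≤ word.length && !stopwords.contains word && !st.1.contains word
  then (st.1.add word, st.2 ++ [word]) else st

-- the loop body of B's character scan; state = (buf, (seen, out))
def pvStep (stopwords : PySem.Set (List Char))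
    (st : List Char × (PySem.Set (List Char) × List (List Char))) (ch : Char) :
    List Char × (PySem.Set (List Char) × List (List Char)) :=
  if PySem.Chars.isspace ch then ([], pvEmit stopwords st.1 st.2)
  else if pvK ch then (st.1 ++ [ch], st.2)
  else st

def search_tokens_py_alt (query : String) : List String :=
  let raw := PySem.Chars.lower (PySem.Chars.strip query.toList)
  let stopwords : PySem.Set (List Char) := PySem.Set.ofList pvStopwords
  let fin := raw.foldl (pvStep stopwords) ([], (PySem.Set.empty, []))
  (pvEmit stopwords fin.1 fin.2).2.map String.ofList

-- ===== PRECONDITION & SPEC =====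
def Spec_search_tokens_py (query : String) (out : List String) : Prop := out = search_tokens_py_alt query
instance (query : String) (out : List String) : Decidable (Spec_search_tokens_py query out) := by unfold Spec_search_tokens_py; infer_instance

-- ===== CLAIM (what is proved, stated in full; the proofs are below) =====
def Claim_equal_search_tokens_py : Prop := ∀ (query : String), Dom_search_tokens_py query → Spec_search_tokens_py query (search_tokens_py query)

-- ===== LEMMAS AND PROOFS =====

lemma pv_go_nil (cur : List Char) (acc : List (List Char)) :
    PySem.Chars.split₀.go [] cur acc
      = if cur.isEmpty then acc.reverse else (cur.reverse :: acc).reverse := rfl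

lemma pv_go_cons (c : Char) (rest cur : List Char) (acc : List (List Char)) :
    PySem.Chars.split₀.go (c :: rest) cur acc
      = if PySem.Chars.isspace c then
          (if cur.isEmpty then PySem.Chars.split₀.go rest [] acc
           else PySem.Chars.split₀.go rest [] (cur.reverse :: acc))
        else PySem.Chars.split₀.go rest (c :: cur) acc := rfl

lemma pv_go_acc (s cur : List Char) (acc : List (List Char)) :
    PySem.Chars.split₀.go s cur acc = acc.reverse ++ PySem.Chars.split₀.go s cur [] := by
  induction s generalizing cur acc with
  | nil =>
    by_cases h : cur.isEmpty <;> simp [pv_go_nil, h]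
  | cons c rest ih =>
    by_cases hs : PySem.Chars.isspace c
    · by_cases hc : cur.isEmpty
      · simp only [pv_go_cons, hs, hc, if_true]
        exact ih [] acc
      · simp only [pv_go_cons, hs, hc, if_true, Bool.false_eq_true, if_false]
        rw [ih [] (cur.reverse :: acc), ih [] [cur.reverse]]
        simp
    · simp only [pv_go_cons, hs, Bool.false_eq_true, if_false]
      exact ih _ _

-- A's fold body on the already-split words
def pvBodyA (tokens : List (List Char)) (w : List Char) : List (List Char) :=
  if 2 ≤ w.length && !(PySem.Set.ofList pvStopwords).contains w && !tokens.contains w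
  then tokens ++ [w] else tokens

-- the final emitted list B's scanner produces, from any scanner state
def pvFinish (st : List Char × (PySem.Set (List Char) × List (List Char))) : List (List Char) :=
  (pvEmit (PySem.Set.ofList pvStopwords) st.1 st.2).2

lemma pv_emit_eq (buf : List Char) (seen : PySem.Set (List Char)) (out : List (List Char))
    (hinv : ∀ x, x ∈ seen ↔ x ∈ out) :
    (pvEmit (PySem.Set.ofList pvStopwords) buf (seen, out)).2 = pvBodyA out buf := by
  simp [pvEmit, pvBodyA, hinv buf]
  split_ifs <;> rfl

-- B's single scan equals A's fold over the words of split₀, for any residual word cur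
lemma pv_scan_eq (s cur : List Char) (seen : PySem.Set (List Char)) (out : List (List Char))
    (hinv : ∀ x, x ∈ seen ↔ x ∈ out) :
    pvFinish (s.foldl (pvStep (PySem.Set.ofList pvStopwords))
        (cur.reverse.filter pvK, (seen, out)))
      = (PySem.Chars.split₀.go s cur []).foldl (fun t w => pvBodyA t (w.filter pvK)) out := by
  induction s generalizing cur seen out with
  | nil =>
    rw [pv_go_nil]
    by_cases hc : cur.isEmpty
    · have : cur = [] := by simpa [List.isEmpty_iff] using hc
      subst this
      simp [pvFinish, pv_emit_eq _ _ _ hinv, pvBodyA]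
    · simp only [hc, Bool.false_eq_true, if_false, List.foldl_nil, List.reverse_cons,
        List.reverse_nil, List.nil_append, List.foldl_cons]
      exact pv_emit_eq _ _ _ hinv
  | cons c rest ih =>
    rw [pv_go_cons]
    by_cases hs : PySem.Chars.isspace c
    · simp only [hs, if_true, List.foldl_cons, pvStep]
      -- the emitted state after the flush
      have hout : (pvEmit (PySem.Set.ofList pvStopwords) (cur.reverse.filter pvK) (seen, out)).2
          = pvBodyA out (cur.reverse.filter pvK) := pv_emit_eq _ _ _ hinv
      have hinv' : ∀ x, x ∈ (pvEmit (PySem.Set.ofList pvStopwords) (cur.reverse.filter pvK) (seen, out)).1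
          ↔ x ∈ (pvEmit (PySem.Set.ofList pvStopwords) (cur.reverse.filter pvK) (seen, out)).2 := by
        intro x
        unfold pvEmit
        by_cases h : (2 ≤ (cur.reverse.filter pvK).length
            && !(PySem.Set.ofList pvStopwords).contains (cur.reverse.filter pvK)
            && !seen.contains (cur.reverse.filter pvK)) = true
        · have hnot : seen.contains (cur.reverse.filter pvK) = false := by
            simp only [Bool.and_eq_true, Bool.not_eq_true'] at h
            exact h.2
          simp only [PySem.Set.add, hnot, Bool.false_eq_true, if_false]
          split_ifs <;> simp [hinv x]
        · simp only [h, Bool.false_eq_true, if_false]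
          exact hinv x
      have := ih [] _ _ hinv'
      simp only [List.reverse_nil, List.filter_nil] at this
      rw [this, hout]
      by_cases hc : cur.isEmpty
      · have : cur = [] := by simpa [List.isEmpty_iff] using hc
        subst this
        simp [pvBodyA]
      · rw [pv_go_acc rest [] [cur.reverse]]
        simp [hc]
    · simp only [hs, Bool.false_eq_true, if_false, List.foldl_cons, pvStep]
      by_cases hk : pvK c
      · have hbuf : cur.reverse.filter pvK ++ [c] = (c :: cur).reverse.filter pvK := by
          simp [List.filter_append, hk]
        simp only [hk, if_true, hbuf]
        exact ih (c :: cur) seen out hinv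
      · have hbuf : cur.reverse.filter pvK = (c :: cur).reverse.filter pvK := by
          simp [List.filter_append, hk]
        simp only [hk, Bool.false_eq_true, if_false]
        rw [show (cur.reverse.filter pvK, (seen, out))
              = ((c :: cur).reverse.filter pvK, (seen, out)) by rw [hbuf]]
        exact ih (c :: cur) seen out hinv

-- ===== VERDICT (by name: the statement is the Claim_ definition above) =====
theorem search_tokens_py_spec : Claim_equal_search_tokens_py := by
  intro query _hdom
  unfold Spec_search_tokens_py search_tokens_py search_tokens_py_alt
  simp only []
  congr 1
  have h := pv_scan_eq (PySem.Chars.lower (PySem.Chars.strip query.toList)) [] PySem.Set.empty []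
    (fun x => by simp [PySem.Set.empty])
  simp only [List.reverse_nil, List.filter_nil] at h
  simp only [PySem.Chars.split₀]
  exact h.symm
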